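-- pv_equiv track=rewrite | github.com/yashitanamdeo/geeks-for-geeks | medium/valid_compressed_string/solution.py | checkCompressed
-- ===== SOURCE A (Python) =====
-- def checkCompressed(S, T):
--     # code here
--     i = 0
--     j = 0
--     m = len(S)
--     n = len(T)
--
--     while i < m and j < n:
--         if not T[j].isdigit():
--             if T[j] != S[i]:
--                 return 0
--             i += 1
--             j += 1
--         else:
--             k = j+1
--             while k < n and T[k].isdigit():
--                 k += 1
--             i += int(T[j:k])
--             j = k
--     return 1 if i == m and j == n else 0
-- ===== SOURCE B (Python) =====
-- def checkCompressed(S, T):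
--     # Phase 1: tokenize T into digit-run values (as ints) and single literal chars.
--     tokens = []
--     num = None
--     for c in T:
--         if c.isdigit():
--             num = c if num is None else num + c
--         else:
--             if num is not None:
--                 tokens.append(int(num))
--                 num = None
--             tokens.append(c)
--     if num is not None:
--         tokens.append(int(num))
--     # Phase 2: one flat scan over the tokens with a cursor into S.
--     i = 0
--     m = len(S)
--     for tok in tokens:
--         if i >= m:
--             return 0
--         if isinstance(tok, int):
--             i += tok
--         elif S[i] != tok:
--             return 0
--         else:
--             i += 1
--     return 1 if i == m else 0
-- ===== Notes on version B (the rewrite author's own statement) =====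
-- stated objective: idiomatic
-- what changed: B replaces A's nested index-juggling while loop (inner digit-run scan with k, slice int(T[j:k])) by a two-phase decomposition: tokenize T once into digit-run values and literal characters, then a single flat loop over the tokens advancing one cursor into S.
import Mathlib
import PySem

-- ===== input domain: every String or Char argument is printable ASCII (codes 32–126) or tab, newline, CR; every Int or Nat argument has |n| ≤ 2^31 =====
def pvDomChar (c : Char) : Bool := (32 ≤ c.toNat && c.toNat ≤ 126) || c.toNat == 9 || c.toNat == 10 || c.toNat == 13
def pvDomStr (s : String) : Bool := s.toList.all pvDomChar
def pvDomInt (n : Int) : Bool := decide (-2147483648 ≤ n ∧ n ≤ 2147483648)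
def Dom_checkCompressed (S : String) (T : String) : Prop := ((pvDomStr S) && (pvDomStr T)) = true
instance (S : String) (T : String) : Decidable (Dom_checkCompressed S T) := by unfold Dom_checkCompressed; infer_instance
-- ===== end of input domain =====

-- B tokenizes T once into digit-run values and literal characters, then runs one flat
-- token loop with a single cursor into S (idiomatic two-phase decomposition).

-- int(<nonempty digit string>): exact for strings of '0'..'9' (the only use in either port)
def pvDigitsVal (ds : List Char) : Nat :=
  ds.foldl (fun a c => a * 10 + (c.toNat - 48)) 0

-- ===== PORT A =====
-- A's while loop over indices i (into S) and j (into T); the T-suffix list stands for j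
-- (j < n ↔ t ≠ []); i stays a counter since it may overshoot S. The inner `while k < n
-- and T[k].isdigit()` scan and the slice T[j:k] are exactly takeWhile/dropWhile on the tail.
def chkLoopA (S : List Char) (i : Nat) (t : List Char) : Int :=
  if i < S.length then
    match t with
    | [] => 0  -- loop exit with j == n but i < m: `1 if i == m and j == n else 0` gives 0
    | c :: rest =>
      if ¬ (PySem.Chars.isdigit c) then
        if S[i]? ≠ some c then 0 else chkLoopA S (i + 1) rest
      else
        chkLoopA S (i + pvDigitsVal (c :: rest.takeWhile PySem.Chars.isdigit))
          (rest.dropWhile PySem.Chars.isdigit)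
  else
    if i = S.length ∧ t = [] then 1 else 0
termination_by t.length
decreasing_by
  · simp
  · simpa using Nat.lt_succ_of_le (rest.length_dropWhile_le _)

def checkCompressed (S : String) (T : String) : Int :=
  chkLoopA S.toList 0 T.toList

-- ===== PORT B =====
inductive PvTok where
  | num : Nat → PvTok
  | lit : Char → PvTok
deriving DecidableEq, Repr

-- one step of B's tokenizing for-loop: state = (tokens so far, pending digit run)
def pvTokStep (st : List PvTok × Option (List Char)) (c : Char) : List PvTok × Option (List Char) :=
  if PySem.Chars.isdigit c then
    (st.1, some ((st.2.getD []) ++ [c]))          -- num = c if num is None else num + c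
  else
    match st.2 with
    | none => (st.1 ++ [PvTok.lit c], none)
    | some ds => (st.1 ++ [PvTok.num (pvDigitsVal ds), PvTok.lit c], none)

def pvTokens (t : List Char) : List PvTok :=
  let st := t.foldl pvTokStep ([], none)
  st.1 ++ (match st.2 with | none => [] | some ds => [PvTok.num (pvDigitsVal ds)])

-- B's flat token loop with cursor i into S
def chkLoopB (S : List Char) (i : Nat) : List PvTok → Int
  | [] => if i = S.length then 1 else 0
  | tok :: rest =>
    if i ≥ S.length then 0
    else
      match tok with
      | PvTok.num v => chkLoopB S (i + v) rest
      | PvTok.lit c => if S[i]? ≠ some c then 0 else chkLoopB S (i + 1) rest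

def checkCompressed_alt (S : String) (T : String) : Int :=
  chkLoopB S.toList 0 (pvTokens T.toList)

-- ===== PRECONDITION & SPEC =====
def Spec_checkCompressed (S : String) (T : String) (out : Int) : Prop := out = checkCompressed_alt S T
instance (S : String) (T : String) (out : Int) : Decidable (Spec_checkCompressed S T out) := by unfold Spec_checkCompressed; infer_instance

-- ===== CLAIM (what is proved, stated in full; the proofs are below) =====
def Claim_equal_checkCompressed : Prop := ∀ (S : String) (T : String), Dom_checkCompressed S T → Spec_checkCompressed S T (checkCompressed S T)

-- ===== LEMMAS AND PROOFS =====

-- recursive characterization of the tokenizer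
def pvTokRec : List Char → List PvTok
  | [] => []
  | c :: rest =>
    if PySem.Chars.isdigit c then
      PvTok.num (pvDigitsVal (c :: rest.takeWhile PySem.Chars.isdigit))
        :: pvTokRec (rest.dropWhile PySem.Chars.isdigit)
    else
      PvTok.lit c :: pvTokRec rest
termination_by t => t.length
decreasing_by
  · simpa using Nat.lt_succ_of_le (rest.length_dropWhile_le _)
  · simp

def pvFinish (st : List PvTok × Option (List Char)) : List PvTok :=
  st.1 ++ (match st.2 with | none => [] | some ds => [PvTok.num (pvDigitsVal ds)])

def pvPend : Option (List Char) → List Char → List PvTok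
  | none, t => pvTokRec t
  | some ds, t =>
      PvTok.num (pvDigitsVal (ds ++ t.takeWhile PySem.Chars.isdigit))
        :: pvTokRec (t.dropWhile PySem.Chars.isdigit)

lemma pvFold_eq (t : List Char) : ∀ (ts : List PvTok) (p : Option (List Char)),
    pvFinish (t.foldl pvTokStep (ts, p)) = ts ++ pvPend p t := by
  induction t with
  | nil =>
    intro ts p
    cases p <;> simp [pvFinish, pvPend, pvTokRec]
  | cons c rest ih =>
    intro ts p
    by_cases hd : PySem.Chars.isdigit c
    · cases p with
      | none =>
        simp only [List.foldl_cons, pvTokStep, hd, if_pos, Option.getD_none, List.nil_append]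
        rw [ih]
        simp [pvPend, pvTokRec, hd]
      | some ds =>
        simp only [List.foldl_cons, pvTokStep, hd, if_pos, Option.getD_some]
        rw [ih]
        simp [pvPend, hd, List.append_assoc]
    · cases p with
      | none =>
        simp only [List.foldl_cons, pvTokStep, hd]
        rw [ih]
        simp [pvPend, pvTokRec, hd]
      | some ds =>
        simp only [List.foldl_cons, pvTokStep, hd]
        rw [ih]
        simp [pvPend, pvTokRec, hd]

lemma pvTokens_eq_rec (t : List Char) : pvTokens t = pvTokRec t := by
  have h := pvFold_eq t [] none
  simpa [pvFinish, pvTokens, pvPend] using h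

@[simp] lemma chkLoopB_nil (S : List Char) (i : Nat) :
    chkLoopB S i [] = if i = S.length then 1 else 0 := rfl

lemma chkLoopB_cons (S : List Char) (i : Nat) (tok : PvTok) (rest : List PvTok) :
    chkLoopB S i (tok :: rest) =
      if i ≥ S.length then 0
      else
        match tok with
        | PvTok.num v => chkLoopB S (i + v) rest
        | PvTok.lit c => if S[i]? ≠ some c then 0 else chkLoopB S (i + 1) rest := rfl

lemma chkLoopB_tokRec (S : List Char) : ∀ (fuel : ℕ) (t : List Char), t.length ≤ fuel →
    ∀ i, chkLoopB S i (pvTokRec t) = chkLoopA S i t := by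
  intro fuel
  induction fuel with
  | zero =>
    intro t ht i
    have hnil : t = [] := List.eq_nil_of_length_eq_zero (Nat.le_zero.mp ht)
    subst hnil
    rw [pvTokRec, chkLoopA]
    by_cases h : i < S.length
    · simp [h, Nat.ne_of_lt h]
    · simp [h]
  | succ n ih =>
    intro t ht i
    match t with
    | [] => exact ih [] (Nat.zero_le _) i
    | c :: rest =>
      simp only [List.length_cons, Nat.succ_le_succ_iff] at ht
      by_cases hd : PySem.Chars.isdigit c
      · rw [pvTokRec, if_pos hd, chkLoopB_cons, chkLoopA]
        by_cases hi : i < S.length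
        · rw [if_neg (Nat.not_le.mpr hi), if_pos hi, if_neg (by simp [hd])]
          exact ih _ (le_trans (rest.length_dropWhile_le _) ht) _
        · rw [if_pos (Nat.le_of_not_lt hi), if_neg hi, if_neg (by simp)]
      · rw [pvTokRec, if_neg hd, chkLoopB_cons, chkLoopA]
        by_cases hi : i < S.length
        · rw [if_neg (Nat.not_le.mpr hi), if_pos hi, if_pos hd]
          change (if S[i]? ≠ some c then (0 : Int) else chkLoopB S (i + 1) (pvTokRec rest)) = _
          by_cases hc : S[i]? ≠ some c
          · rw [if_pos hc, if_pos hc]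
          · rw [if_neg hc, if_neg hc]
            exact ih rest ht (i + 1)
        · rw [if_pos (Nat.le_of_not_lt hi), if_neg hi, if_neg (by simp)]

-- ===== VERDICT (by name: the statement is the Claim_ definition above) =====
theorem checkCompressed_spec : Claim_equal_checkCompressed := by
  intro S T _
  unfold Spec_checkCompressed checkCompressed checkCompressed_alt
  rw [pvTokens_eq_rec]
  exact (chkLoopB_tokRec S.toList T.toList.length T.toList (le_refl _) 0).symm
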